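-- pv_equiv track=rewrite | github.com/stevenjlance/Technical-Interview-Workshop | Exercises/Week7/lab/main.py | find_leaf_indexes
-- ===== SOURCE A (Python) =====
-- def left_of(idx):
--     return 2*idx + 1
--
-- def right_of(idx):
--     return 2*idx + 2
--
-- def find_leaf_indexes(heap):
--   leaf_indexes = []
--   for i in range(len(heap)):
--     left_child_idx = left_of(i)
--     right_child_idx = right_of(i)
--     # Check if both left and right child indexes are greater than or equal to the heap length
--     if left_child_idx >= len(heap) and right_child_idx >= len(heap):
--       leaf_indexes.append(i)
--
--   return leaf_indexes
-- ===== SOURCE B (Python) =====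
-- def find_leaf_indexes(heap):
--   # All leaves are exactly the indexes from len(heap)//2 to the end.
--   return list(range(len(heap) // 2, len(heap)))
-- ===== Notes on version B (the rewrite author's own statement) =====
-- stated objective: simpler
-- what changed: Replaces the per-index loop testing both child indexes with the closed form list(range(n//2, n)), since index i is a leaf iff 2i+1 >= n, i.e. i >= n//2.
import Mathlib
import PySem

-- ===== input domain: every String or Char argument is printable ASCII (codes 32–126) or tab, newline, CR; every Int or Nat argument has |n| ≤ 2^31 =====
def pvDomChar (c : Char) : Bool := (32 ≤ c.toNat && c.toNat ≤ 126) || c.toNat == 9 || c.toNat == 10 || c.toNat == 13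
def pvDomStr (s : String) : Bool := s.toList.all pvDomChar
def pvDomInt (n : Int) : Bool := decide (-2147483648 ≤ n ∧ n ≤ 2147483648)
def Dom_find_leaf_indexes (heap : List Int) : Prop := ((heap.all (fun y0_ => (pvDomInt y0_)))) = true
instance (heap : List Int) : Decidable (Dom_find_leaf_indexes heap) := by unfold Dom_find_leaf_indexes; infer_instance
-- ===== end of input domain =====

-- B replaces A's per-index loop (testing both child indexes) with the closed form
-- range(n//2, n); objective: simpler.

-- ===== PORT A =====
def left_of (idx : Int) : Int := 2 * idx + 1

def right_of (idx : Int) : Int := 2 * idx + 2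

def find_leaf_indexes (heap : List Int) : List Int :=
  (PySem.List.pyRange 0 (heap.length : Int) 1).foldl
    (fun leaf_indexes i =>
      let left_child_idx := left_of i
      let right_child_idx := right_of i
      if left_child_idx ≥ (heap.length : Int) ∧ right_child_idx ≥ (heap.length : Int) then
        leaf_indexes ++ [i]
      else leaf_indexes) []

-- ===== PORT B =====
def find_leaf_indexes_alt (heap : List Int) : List Int :=
  PySem.List.pyRange (PySem.Int.floordiv (heap.length : Int) 2) (heap.length : Int) 1

-- ===== PRECONDITION & SPEC =====
def Spec_find_leaf_indexes (heap : List Int) (out : List Int) : Prop := out = find_leaf_indexes_alt heap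
instance (heap : List Int) (out : List Int) : Decidable (Spec_find_leaf_indexes heap out) := by unfold Spec_find_leaf_indexes; infer_instance

-- ===== CLAIM (what is proved, stated in full; the proofs are below) =====
def Claim_equal_find_leaf_indexes : Prop := ∀ (heap : List Int), Dom_find_leaf_indexes heap → Spec_find_leaf_indexes heap (find_leaf_indexes heap)

-- ===== LEMMAS AND PROOFS =====

-- ===== VERDICT (by name: the statement is the Claim_ definition above) =====
theorem find_leaf_indexes_spec : Claim_equal_find_leaf_indexes := by
  intro heap _
  unfold Spec_find_leaf_indexes find_leaf_indexes find_leaf_indexes_alt left_of right_of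
  set n : Nat := heap.length with hn
  have hfd : PySem.Int.floordiv (n : Int) 2 = ((n / 2 : Nat) : Int) := by
    exact_mod_cast PySem.Int.floordiv_natCast n 2
  rw [PySem.List.foldl_append_ite_eq_filter, List.nil_append,
    PySem.List.pyRange_one_append 0 (PySem.Int.floordiv (n : Int) 2) (n : Int)
      (by rw [hfd]; positivity)
      (by rw [hfd]; exact_mod_cast Nat.div_le_self n 2),
    List.filter_append]
  rw [List.filter_eq_nil_iff.mpr, List.filter_eq_self.mpr, List.nil_append]
  · intro i hi
    have := (PySem.List.mem_pyRange_one).mp hi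
    simp only [decide_eq_true_eq]
    omega
  · intro i hi
    have := (PySem.List.mem_pyRange_one).mp hi
    rw [hfd] at this
    simp only [decide_eq_true_eq]
    omega
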